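-- pv_equiv track=rewrite | github.com/Moe131/webcrawler | scraper.py | repetitive
-- ===== SOURCE A (Python) =====
-- def repetitive(url):
--     """ Checks for repeating segments Note! this is a work in progress. """
--     sectionDict = {}
--     section = url.split("/")
--     current = None
--     for i in section:
--         if i in sectionDict:
--             sectionDict[i] += 1
--             if sectionDict[i] >= 3:
--                 return True
--         else:
--             sectionDict[i] = 1
--     return False
-- ===== SOURCE B (Python) =====
-- def repetitive(url):
--     """ Checks for repeating segments Note! this is a work in progress. """
--     sections = sorted(url.split("/"))
--     return any(sections[i] == sections[i + 2] for i in range(len(sections) - 2))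
-- ===== Notes on version B (the rewrite author's own statement) =====
-- stated objective: alternative
-- what changed: A's single-pass incremental dict-counting loop with early return is replaced by a sort-then-adjacent-scan: sort the segments and test whether some element equals the one two positions later (a segment occurs >= 3 times iff the sorted list has sections[i] == sections[i+2]).
import Mathlib
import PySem

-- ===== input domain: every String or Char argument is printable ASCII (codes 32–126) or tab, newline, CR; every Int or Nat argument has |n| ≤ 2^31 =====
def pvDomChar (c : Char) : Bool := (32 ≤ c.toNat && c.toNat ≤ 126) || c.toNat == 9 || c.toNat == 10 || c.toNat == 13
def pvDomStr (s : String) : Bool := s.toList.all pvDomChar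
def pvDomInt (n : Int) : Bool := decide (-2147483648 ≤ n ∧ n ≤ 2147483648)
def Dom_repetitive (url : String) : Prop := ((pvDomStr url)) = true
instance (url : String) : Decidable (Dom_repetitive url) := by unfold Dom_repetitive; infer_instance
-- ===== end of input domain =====

-- B replaces A's incremental dict-counting loop (early return) by a sort-then-adjacent-scan:
-- sort the segments and test whether some element equals the one two positions later; objective: alternative.

-- ===== PORT A =====
-- the 'for i in section' loop with dict state and early 'return True';
-- 'sectionDict[i] += 1' reads an existing key, so 'getD i 0' is exact here (contains i holds)
def repetitiveLoop (d : PySem.Dict (List Char) Int) : List (List Char) → Bool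
  | [] => false
  | i :: t =>
    if d.contains i then
      let d' := d.insert i (d.getD i 0 + 1)
      if 3 ≤ d'.getD i 0 then true else repetitiveLoop d' t
    else
      repetitiveLoop (d.insert i 1) t

-- url.split("/"): the separator is the non-empty constant "/", so Chars.splitOn is exact
def repetitive (url : String) : Bool :=
  repetitiveLoop PySem.Dict.empty (PySem.Chars.splitOn url.toList "/".toList)

-- ===== PORT B =====
-- sorted(url.split("/")): Python compares strings lexicographically by code point, which is
-- exactly the lexicographic LinearOrder on List Char (instances written out so its order lemmas apply)
def pvSortedSegs (xs : List (List Char)) : List (List Char) :=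
  @PySem.List.sorted (List Char) (List Char)
    (@Preorder.toLT _ (@PartialOrder.toPreorder _ (@LinearOrder.toPartialOrder _ List.instLinearOrder)))
    (@LinearOrder.toDecidableLT _ List.instLinearOrder) xs (fun s => s) false

-- then any(sections[i] == sections[i+2] for i in range(len(sections)-2))
def repetitive_alt (url : String) : Bool :=
  let sections := pvSortedSegs (PySem.Chars.splitOn url.toList "/".toList)
  (PySem.List.pyRange 0 ((sections.length : Int) - 2) 1).any
    (fun i => PySem.List.pyGet? sections i == PySem.List.pyGet? sections (i + 2))

-- ===== PRECONDITION & SPEC =====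
def Spec_repetitive (url : String) (out : Bool) : Prop := out = repetitive_alt url
instance (url : String) (out : Bool) : Decidable (Spec_repetitive url out) := by unfold Spec_repetitive; infer_instance

-- ===== CLAIM (what is proved, stated in full; the proofs are below) =====
def Claim_equal_repetitive : Prop := ∀ (url : String), Dom_repetitive url → Spec_repetitive url (repetitive url)

-- ===== LEMMAS AND PROOFS =====

-- Absorption: a head test that is duplicated in (or false for) the tail scan drops out
lemma pvAnyAbsorbHead {α : Type} (t : List α) (f : α → Bool) (i : α)
    (h : i ∈ t ∨ f i = false) : (f i || t.any f) = t.any f := by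
  rcases h with hit | hf
  · cases hfi : f i
    · simp
    · simp [List.any_eq_true.mpr ⟨i, hit, hfi⟩]
  · simp [hf]

-- Loop invariant: provided absent keys read as 0, A's loop over l answers
-- "does some segment s of l reach total count d[s] + l.count s ≥ 3".
lemma repetitiveLoop_eq (l : List (List Char)) : ∀ d : PySem.Dict (List Char) Int,
    (∀ s, d.contains s = false → d.getD s 0 = 0) →
    repetitiveLoop d l = l.any (fun s => decide (3 ≤ d.getD s 0 + (l.count s : Int))) := by
  induction l with
  | nil => intro d _; simp [repetitiveLoop]
  | cons i t ih =>
    intro d hd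
    simp only [repetitiveLoop]
    by_cases hc : d.contains i = true
    case pos =>
      simp only [hc, if_true, PySem.Dict.getD_insert_self]
      by_cases h3 : (3 : Int) ≤ d.getD i 0 + 1
      · -- early return: the head segment alone already certifies the count
        have h1 : 1 ≤ (i :: t).count i := by simp
        simp only [h3, if_true, List.any_cons, List.count_cons_self, eq_comm (a := true),
          Bool.or_eq_true, decide_eq_true_eq]
        left; push_cast; omega
      · simp only [h3, if_false]
        rw [ih _ (fun s hs => by
          rw [PySem.Dict.contains_insert, Bool.or_eq_false_iff, beq_eq_false_iff_ne] at hs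
          rw [PySem.Dict.getD_insert_of_ne _ _ _ hs.1, hd s hs.2])]
        rw [List.any_cons]
        have hcnt : ∀ s ∈ t, decide (3 ≤ d.getD s 0 + ((i :: t).count s : Int))
            = decide (3 ≤ (d.insert i (d.getD i 0 + 1)).getD s 0 + (t.count s : Int)) := by
          intro s _
          rw [decide_eq_decide, PySem.Dict.getD_insert, List.count_cons]
          rcases eq_or_ne s i with rfl | hsi
          · rw [if_pos rfl]; simp; omega
          · rw [if_neg hsi, if_neg (by simp [Ne.symm hsi])]; push_cast; omega
        rw [PySem.List.any_congr_mem hcnt]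
        have heq : decide (3 ≤ d.getD i 0 + ((i :: t).count i : Int))
            = decide (3 ≤ (d.insert i (d.getD i 0 + 1)).getD i 0 + (t.count i : Int)) := by
          rw [decide_eq_decide, PySem.Dict.getD_insert_self, List.count_cons_self]
          push_cast; omega
        rw [heq]
        rcases Decidable.em (i ∈ t) with hit | hit
        · exact (pvAnyAbsorbHead t _ i (Or.inl hit)).symm
        · refine (pvAnyAbsorbHead t _ i (Or.inr ?_)).symm
          have hzc : t.count i = 0 := List.count_eq_zero.mpr hit
          rw [PySem.Dict.getD_insert_self, hzc, decide_eq_false_iff_not]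
          push_cast; omega
    case neg =>
      rw [Bool.not_eq_true] at hc
      have hz : d.getD i 0 = 0 := hd i hc
      simp only [hc, Bool.false_eq_true, if_false]
      rw [ih _ (fun s hs => by
        rw [PySem.Dict.contains_insert, Bool.or_eq_false_iff, beq_eq_false_iff_ne] at hs
        rw [PySem.Dict.getD_insert_of_ne _ _ _ hs.1, hd s hs.2])]
      rw [List.any_cons]
      have hcnt : ∀ s ∈ t, decide (3 ≤ d.getD s 0 + ((i :: t).count s : Int))
          = decide (3 ≤ (d.insert i 1).getD s 0 + (t.count s : Int)) := by
        intro s _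
        rw [decide_eq_decide, PySem.Dict.getD_insert, List.count_cons]
        rcases eq_or_ne s i with rfl | hsi
        · rw [if_pos rfl, hz]; simp; omega
        · rw [if_neg hsi, if_neg (by simp [Ne.symm hsi])]; push_cast; omega
      rw [PySem.List.any_congr_mem hcnt]
      have heq : decide (3 ≤ d.getD i 0 + ((i :: t).count i : Int))
          = decide (3 ≤ (d.insert i 1).getD i 0 + (t.count i : Int)) := by
        rw [decide_eq_decide, PySem.Dict.getD_insert_self, List.count_cons_self, hz]
        push_cast; omega
      rw [heq]
      rcases Decidable.em (i ∈ t) with hit | hit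
      · exact (pvAnyAbsorbHead t _ i (Or.inl hit)).symm
      · refine (pvAnyAbsorbHead t _ i (Or.inr ?_)).symm
        have hzc : t.count i = 0 := List.count_eq_zero.mpr hit
        rw [PySem.Dict.getD_insert_self, hzc, decide_eq_false_iff_not]
        norm_num

-- In a ≤-sorted list, a triple-occurring value shows up as m[k] = m[k+2].
lemma pvSortedCountThree (m : List (List Char)) (hp : m.Pairwise (· ≤ ·)) (v : List Char)
    (hc : 3 ≤ m.count v) : ∃ k : Nat, ∃ h : k + 2 < m.length, m[k] = m[k + 2] := by
  induction m with
  | nil => simp at hc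
  | cons a t ih =>
    rcases List.pairwise_cons.mp hp with ⟨ha, hpt⟩
    by_cases h3 : 3 ≤ t.count v
    · obtain ⟨k, hk, he⟩ := ih hpt h3
      exact ⟨k + 1, by simpa using Nat.succ_lt_succ hk, by simpa using he⟩
    · -- head is v and t starts with v, v
      have hav : a = v := by
        by_contra hne
        have hne' : ¬ (v = a) := fun h => hne h.symm
        apply h3
        simp only [List.count_cons, beq_iff_eq] at hc
        rw [if_neg hne] at hc
        omega
      rw [hav, List.count_cons_self] at hc
      obtain ⟨b, u, rfl⟩ : ∃ b u, t = b :: u := by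
        cases t with
        | nil => simp at hc
        | cons b u => exact ⟨b, u, rfl⟩
      rcases List.pairwise_cons.mp hpt with ⟨hbu, hpu⟩
      have hvt : v ∈ b :: u := List.count_pos_iff.mp (by omega)
      have hbv : b = v := by
        rcases List.mem_cons.mp hvt with h | h
        · exact h.symm
        · exact le_antisymm (hbu v h) (hav ▸ ha b (by simp))
      rw [hbv, List.count_cons_self] at hc
      have hvu : v ∈ u := List.count_pos_iff.mp (by omega)
      obtain ⟨c, w, rfl⟩ : ∃ c w, u = c :: w := by
        cases u with
        | nil => simp at hvu
        | cons c w => exact ⟨c, w, rfl⟩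
      rcases List.pairwise_cons.mp hpu with ⟨hcw, _⟩
      have hcv : c = v := by
        rcases List.mem_cons.mp hvu with h | h
        · exact h.symm
        · exact le_antisymm (hcw v h) (hbv ▸ hbu c (by simp))
      exact ⟨0, by simp, by simp [hav, hcv]⟩

-- Conversely, m[k] = m[k+2] in a ≤-sorted list forces three equal elements in a row.
lemma pvAdjCountThree (m : List (List Char)) (hp : m.Pairwise (· ≤ ·)) (k : Nat)
    (hk : k + 2 < m.length) (he : m[k] = m[k + 2]) : 3 ≤ m.count m[k] := by
  have hpg := List.pairwise_iff_getElem.mp hp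
  have h1 : m[k] ≤ m[k + 1] := hpg k (k + 1) (by omega) (by omega) (by omega)
  have h2 : m[k + 1] ≤ m[k + 2] := hpg (k + 1) (k + 2) (by omega) hk (by omega)
  have he1 : m[k + 1] = m[k] := le_antisymm (he ▸ h2) h1
  have hd0 : m.drop k = m[k] :: m.drop (k + 1) := List.drop_eq_getElem_cons (by omega)
  have hd1 : m.drop (k + 1) = m[k + 1] :: m.drop (k + 2) := List.drop_eq_getElem_cons (by omega)
  have hd2 : m.drop (k + 2) = m[k + 2] :: m.drop (k + 3) := List.drop_eq_getElem_cons (by omega)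
  have hsub : (m.drop k).count m[k] ≤ m.count m[k] := (List.drop_sublist k m).count_le _
  rw [hd0, hd1, hd2, he1, ← he] at hsub
  simp only [List.count_cons_self] at hsub
  omega

-- The two phrasings agree: for any ≤-sorted rearrangement m of l,
-- some count in l reaches 3 iff m has m[k] = m[k+2].
lemma pvMainIffGen (l m : List (List Char)) (hperm : m.Perm l) (hp : m.Pairwise (· ≤ ·)) :
    (l.any fun s => decide (3 ≤ (l.count s : Int)))
      = ((PySem.List.pyRange 0 ((m.length : Int) - 2) 1).any
          (fun i => PySem.List.pyGet? m i == PySem.List.pyGet? m (i + 2))) := by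
  cases hb : (l.any fun s => decide (3 ≤ (l.count s : Int))) with
  | false =>
    -- A-side false: show B-side false
    symm
    rw [Bool.eq_false_iff] at hb ⊢
    intro hany
    obtain ⟨i, hi, hf⟩ := List.any_eq_true.mp hany
    rw [PySem.List.mem_pyRange_one] at hi
    obtain ⟨hi0, hi2⟩ := hi
    have hkl : i.toNat + 2 < m.length := by omega
    have g1 : PySem.List.pyGet? m i = some m[i.toNat] :=
      PySem.List.pyGet?_eq_some_getElem m hi0 (by omega)
    have g2 : PySem.List.pyGet? m (i + 2) = some m[(i + 2).toNat] :=
      PySem.List.pyGet?_eq_some_getElem m (by omega) (by omega)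
    have ht2 : (i + 2).toNat = i.toNat + 2 := by omega
    rw [g1, g2] at hf
    have heq0 : m[i.toNat] = m[(i + 2).toNat] := Option.some_inj.mp (eq_of_beq hf)
    have heq : m[i.toNat] = m[i.toNat + 2] := by simp only [ht2] at heq0; exact heq0
    have h3 := pvAdjCountThree m hp i.toNat hkl heq
    have hmem : m[i.toNat] ∈ l := hperm.mem_iff.mp (List.getElem_mem _)
    apply hb
    refine List.any_eq_true.mpr ⟨m[i.toNat], hmem, ?_⟩
    rw [hperm.count_eq] at h3
    simpa using by exact_mod_cast (h3 : 3 ≤ l.count m[i.toNat])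
  | true =>
    -- A-side true: produce an index
    obtain ⟨v, hv, hcv⟩ := List.any_eq_true.mp hb
    have hc3 : 3 ≤ m.count v := by
      rw [hperm.count_eq]
      exact_mod_cast of_decide_eq_true hcv
    obtain ⟨k, hk, he⟩ := pvSortedCountThree m hp v hc3
    symm
    refine List.any_eq_true.mpr ⟨(k : Int), ?_, ?_⟩
    · rw [PySem.List.mem_pyRange_one]
      exact ⟨Int.natCast_nonneg k, by omega⟩
    · have g1 : PySem.List.pyGet? m (k : Int) = some m[k] := by
        rw [PySem.List.pyGet?_natCast]
        exact List.getElem?_eq_getElem (by omega)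
      have hcast : ((k : Int) + 2) = ((k + 2 : Nat) : Int) := by omega
      have g2 : PySem.List.pyGet? m ((k : Int) + 2) = some m[k + 2] := by
        rw [hcast, PySem.List.pyGet?_natCast]
        exact List.getElem?_eq_getElem hk
      rw [g1, g2]
      simpa using he

-- Instantiate at m = sorted(l): it is a permutation of l and pairwise ≤.
lemma pvMainIff (l : List (List Char)) :
    (l.any fun s => decide (3 ≤ (l.count s : Int)))
      = ((PySem.List.pyRange 0 (((pvSortedSegs l).length : Int) - 2) 1).any
          (fun i => PySem.List.pyGet? (pvSortedSegs l) i
            == PySem.List.pyGet? (pvSortedSegs l) (i + 2))) :=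
  pvMainIffGen l (pvSortedSegs l)
    (@PySem.List.sorted_perm (List Char) (List Char) _
      (@LinearOrder.toDecidableLT _ List.instLinearOrder) l (fun s => s) false)
    (by simpa using PySem.List.sorted_pairwise l (fun s => s))

-- ===== VERDICT (by name: the statement is the Claim_ definition above) =====
theorem repetitive_spec : Claim_equal_repetitive := by
  intro url _
  unfold Spec_repetitive repetitive repetitive_alt
  rw [repetitiveLoop_eq _ _ (fun s _ => by simp [PySem.Dict.getD_empty])]
  simp only [PySem.Dict.getD_empty, zero_add]
  exact pvMainIff _
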